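-- pv_equiv track=rewrite | github.com/volcengine/veScale | python/vescale/dtensor/ops/math_ops.py | _infer_reduce_dims_map
-- ===== SOURCE A (Python) =====
-- from typing import cast, List, Optional, Sequence, Tuple
--
-- def _infer_reduce_dims_map(reduction_dims: List[int], input_ndim: int, keep_dim=False) -> List[int]:
--     reduction_dims_map = []
--     new_dim_count = 0
--     for input_dim in range(input_ndim):
--         if input_dim in reduction_dims and not keep_dim:
--             # if input dim in reduction dims, mark it as -1
--             reduction_dims_map.append(-1)
--         else:
--             # otherwise mark it as the new dim
--             reduction_dims_map.append(new_dim_count)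
--             new_dim_count += 1
--
--     return reduction_dims_map
-- ===== SOURCE B (Python) =====
-- def _infer_reduce_dims_map(reduction_dims, input_ndim, keep_dim=False):
--     kept = [i for i in range(input_ndim) if keep_dim or i not in reduction_dims]
--     index = {d: n for n, d in enumerate(kept)}
--     return [index.get(i, -1) for i in range(input_ndim)]
-- ===== Notes on version B (the rewrite author's own statement) =====
-- stated objective: simpler
-- what changed: Replaces the single accumulator-counting loop with a two-pass decomposition: first collect the kept dimensions, then build a dim->new-index table from them and map each dimension through it (reduced dims fall back to -1).
import Mathlib
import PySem

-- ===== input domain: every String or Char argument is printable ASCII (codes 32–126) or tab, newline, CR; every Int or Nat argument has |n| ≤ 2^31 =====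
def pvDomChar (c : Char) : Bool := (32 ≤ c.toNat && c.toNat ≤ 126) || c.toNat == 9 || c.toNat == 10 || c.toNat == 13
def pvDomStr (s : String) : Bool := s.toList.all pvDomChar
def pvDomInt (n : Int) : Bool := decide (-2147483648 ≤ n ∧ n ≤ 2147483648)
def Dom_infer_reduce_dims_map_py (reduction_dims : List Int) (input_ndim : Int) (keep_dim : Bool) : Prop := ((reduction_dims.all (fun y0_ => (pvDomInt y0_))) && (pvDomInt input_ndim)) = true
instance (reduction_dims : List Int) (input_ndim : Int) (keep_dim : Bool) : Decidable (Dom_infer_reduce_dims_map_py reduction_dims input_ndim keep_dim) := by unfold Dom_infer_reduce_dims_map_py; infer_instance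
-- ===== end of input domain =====

-- B replaces A's single accumulator-counting loop by a two-pass decomposition (collect kept dims, then position lookup); objective: simpler.


-- ===== PORT A =====
-- loop over range(input_ndim) carrying (result list, new_dim_count)
def infer_reduce_dims_map_py (reduction_dims : List Int) (input_ndim : Int) (keep_dim : Bool) : List Int :=
  let st := (PySem.List.pyRange 0 input_ndim 1).foldl
    (fun (st : List Int × Int) input_dim =>
      if reduction_dims.contains input_dim && !keep_dim then
        (st.1 ++ [-1], st.2)
      else
        (st.1 ++ [st.2], st.2 + 1))
    ([], 0)
  st.1

-- ===== PORT B =====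
-- kept = [i for i in range(n) if keep_dim or i not in reduction_dims]
-- index = {d: n for n, d in enumerate(kept)}
-- return [index.get(i, -1) for i in range(n)]
def infer_reduce_dims_map_py_alt (reduction_dims : List Int) (input_ndim : Int) (keep_dim : Bool) : List Int :=
  let kept := (PySem.List.pyRange 0 input_ndim 1).filter
    (fun i => keep_dim || !(reduction_dims.contains i))
  let index := (PySem.List.enumerate kept).foldl
    (fun (d : PySem.Dict Int Int) p => d.insert p.2 p.1) PySem.Dict.empty
  (PySem.List.pyRange 0 input_ndim 1).map (fun i => index.getD i (-1))

-- ===== PRECONDITION & SPEC =====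
def Spec_infer_reduce_dims_map_py (reduction_dims : List Int) (input_ndim : Int) (keep_dim : Bool) (out : List Int) : Prop := out = infer_reduce_dims_map_py_alt reduction_dims input_ndim keep_dim
instance (reduction_dims : List Int) (input_ndim : Int) (keep_dim : Bool) (out : List Int) : Decidable (Spec_infer_reduce_dims_map_py reduction_dims input_ndim keep_dim out) := by unfold Spec_infer_reduce_dims_map_py; infer_instance

-- ===== CLAIM (what is proved, stated in full; the proofs are below) =====
def Claim_equal_infer_reduce_dims_map_py : Prop := ∀ (reduction_dims : List Int) (input_ndim : Int) (keep_dim : Bool), Dom_infer_reduce_dims_map_py reduction_dims input_ndim keep_dim → Spec_infer_reduce_dims_map_py reduction_dims input_ndim keep_dim (infer_reduce_dims_map_py reduction_dims input_ndim keep_dim)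

-- ===== LEMMAS AND PROOFS =====

-- reference recursion: A's loop body as structural recursion on the range list
def pvRef (q : Int → Bool) : List Int → Int → List Int
  | [], _ => []
  | i :: t, c => if q i then -1 :: pvRef q t c else c :: pvRef q t (c + 1)

lemma pvA_foldl_eq_ref (q : Int → Bool) (L : List Int) :
    ∀ (acc : List Int) (c : Int),
      (L.foldl (fun (st : List Int × Int) i =>
        if q i then (st.1 ++ [-1], st.2) else (st.1 ++ [st.2], st.2 + 1)) (acc, c)).1
      = acc ++ pvRef q L c := by
  induction L with
  | nil => intro acc c; simp [pvRef]
  | cons i t ih =>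
      intro acc c
      by_cases hq : q i = true <;>
        simp [pvRef, hq, ih, List.append_assoc]

lemma pvB_map_eq_ref (q : Int → Bool) (L : List Int) (hL : L.Nodup) :
    ∀ (c : Int),
      L.map (fun i =>
        if (L.filter (fun x => !q x)).contains i then
          c + (((PySem.List.index? (L.filter (fun x => !q x)) i).getD 0 : Nat) : Int)
        else -1)
      = pvRef q L c := by
  induction L with
  | nil => intro c; simp [pvRef]
  | cons i t ih =>
      intro c
      obtain ⟨hi, ht⟩ := List.nodup_cons.mp hL
      by_cases hq : q i = true
      · -- i is reduced: it is dropped by the filter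
        have hfil : (i :: t).filter (fun x => !q x) = t.filter (fun x => !q x) := by
          simp [hq]
        have hnc : (t.filter (fun x => !q x)).contains i = false := by
          simp only [List.contains_eq_mem, decide_eq_false_iff_not]
          exact fun h => hi (List.mem_of_mem_filter h)
        simp only [List.map_cons, hfil, hnc, pvRef, hq, if_true, Bool.false_eq_true,
          if_false]
        exact congrArg (-1 :: ·) (ih ht c)
      · -- i is kept: it heads the filtered list
        have hfil : (i :: t).filter (fun x => !q x) = i :: t.filter (fun x => !q x) := by
          simp [hq]
        set kt := t.filter (fun x => !q x) with hkt
        have hhead : (if (i :: kt).contains i then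
              c + (((PySem.List.index? (i :: kt) i).getD 0 : Nat) : Int)
            else -1) = c := by
          rw [PySem.List.index?_cons_self]
          simp
        have htail : t.map (fun j =>
            if (i :: kt).contains j then
              c + (((PySem.List.index? (i :: kt) j).getD 0 : Nat) : Int)
            else -1) = pvRef q t (c + 1) := by
          rw [← ih ht (c + 1)]
          apply List.map_congr_left
          intro j hj
          have hne : i ≠ j := fun h => hi (h ▸ hj)
          rw [PySem.List.index?_cons_of_ne _ hne]
          by_cases hm : j ∈ kt
          · obtain ⟨k, hk⟩ := Option.isSome_iff_exists.mp
              ((PySem.List.index?_isSome_iff kt j).mpr hm)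
            have hcj : kt.contains j = true := by simpa [List.contains_eq_mem] using hm
            have hcj' : (i :: kt).contains j = true := by
              simp [List.contains_eq_mem, hm]
            rw [hcj', hcj, hk]
            simp
            ring
          · have hcj : kt.contains j = false := by simpa [List.contains_eq_mem] using hm
            have hji : ¬ j = i := fun h => hne h.symm
            have hcj' : (i :: kt).contains j = false := by
              simp [List.contains_eq_mem, hm, hji]
            rw [hcj', hcj]
            simp
        simp only [List.map_cons, hfil, pvRef, hq, Bool.false_eq_true, if_false]
        rw [hhead, htail]

-- the two Python predicates agree: keep ∨ ¬member  =  ¬(member ∧ ¬keep)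
lemma pv_pred_eq (rd : List Int) (keep : Bool) :
    (fun i => keep || !(rd.contains i)) = (fun i => !(rd.contains i && !keep)) := by
  funext i
  cases keep <;> cases h : rd.contains i <;> simp [h]

-- the position dict built by python's {d: n for n, d in enumerate(kept)} looks up positions
lemma pvDict_getD_enumerate (ks : List Int) :
    ∀ (s : Int) (d : PySem.Dict Int Int) (j : Int), ks.Nodup →
      ((PySem.List.enumerate ks s).foldl
        (fun (d : PySem.Dict Int Int) p => d.insert p.2 p.1) d).getD j (-1)
      = if ks.contains j then s + (((PySem.List.index? ks j).getD 0 : Nat) : Int)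
        else d.getD j (-1) := by
  induction ks with
  | nil => intro s d j _; simp [PySem.List.enumerate_nil]
  | cons x t ih =>
      intro s d j hnd
      obtain ⟨hx, ht⟩ := List.nodup_cons.mp hnd
      rw [PySem.List.enumerate_cons]
      simp only [List.foldl_cons]
      rw [ih (s + 1) (d.insert x s) j ht]
      by_cases hjx : j = x
      · subst hjx
        have hct : t.contains j = false := by
          simpa [List.contains_eq_mem] using hx
        rw [hct, PySem.List.index?_cons_self]
        simp [PySem.Dict.getD_insert]
      · rw [PySem.List.index?_cons_of_ne _ (fun h => hjx h.symm)]
        rw [PySem.Dict.getD_insert]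
        by_cases hm : j ∈ t
        · have hct : t.contains j = true := by simpa [List.contains_eq_mem] using hm
          have hct' : (x :: t).contains j = true := by simp [List.contains_eq_mem, hm]
          obtain ⟨k, hk⟩ := Option.isSome_iff_exists.mp
            ((PySem.List.index?_isSome_iff t j).mpr hm)
          rw [hct, hct', hk]
          simp [hjx]
          ring
        · have hct : t.contains j = false := by simpa [List.contains_eq_mem] using hm
          have hct' : (x :: t).contains j = false := by
            simp [List.contains_eq_mem, hm, hjx]
          rw [hct, hct']
          simp [hjx]

-- ===== VERDICT (by name: the statement is the Claim_ definition above) =====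
theorem infer_reduce_dims_map_py_spec : Claim_equal_infer_reduce_dims_map_py := by
  intro rd n keep _
  unfold Spec_infer_reduce_dims_map_py infer_reduce_dims_map_py infer_reduce_dims_map_py_alt
  set q := fun i => rd.contains i && !keep with hqdef
  have hnodup := PySem.List.nodup_pyRange_one 0 n
  rw [pv_pred_eq rd keep]
  have hkept : ((PySem.List.pyRange 0 n 1).filter (fun x => !q x)).Nodup :=
    hnodup.filter _
  -- the dict lookup pass is the index?-based lookup pass
  have hdict : (PySem.List.pyRange 0 n 1).map (fun i =>
      ((PySem.List.enumerate ((PySem.List.pyRange 0 n 1).filter (fun x => !q x))).foldl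
        (fun (d : PySem.Dict Int Int) p => d.insert p.2 p.1) PySem.Dict.empty).getD i (-1))
      = (PySem.List.pyRange 0 n 1).map (fun i =>
      if ((PySem.List.pyRange 0 n 1).filter (fun x => !q x)).contains i then
        (0 : Int) + (((PySem.List.index? ((PySem.List.pyRange 0 n 1).filter (fun x => !q x)) i).getD 0 : Nat) : Int)
      else -1) := by
    apply List.map_congr_left
    intro j _
    rw [pvDict_getD_enumerate _ 0 _ j hkept]
    by_cases h : ((PySem.List.pyRange 0 n 1).filter (fun x => !q x)).contains j = true <;>
      simp [h, PySem.Dict.getD, PySem.Dict.get?, PySem.Dict.empty]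
  have hB := pvB_map_eq_ref q (PySem.List.pyRange 0 n 1) hnodup 0
  have hA := pvA_foldl_eq_ref q (PySem.List.pyRange 0 n 1) [] 0
  simp only [hqdef] at hA hB hdict
  rw [hA]
  rw [hdict, ← hB]
  simp
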